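-- pv_equiv track=rewrite | github.com/bitsofbits/advent_of_code | 2023/day_04/pythonimp/implementation.py | part_2
-- ===== SOURCE A (Python) =====
-- def parse_card(line):
--     # Card 1: 41 48 83 86 17 | 83 86  6 31 17  9 48 53
--     name, rest = line.split(':')
--     winners_text, numbers_text = rest.split('|')
--     winners = set(int(x) for x in winners_text.strip().split())
--     numbers = [int(x) for x in numbers_text.strip().split()]
--     return name, winners, numbers
--
-- def parse(text):
--     """
--     >>> list(parse(EXAMPLE_TEXT))[0]
--     ('Card 1', {41, 48, 17, 83, 86}, [83, 86, 6, 31, 17, 9, 48, 53])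
--     """
--     for line in text.strip().split('\n'):
--         yield parse_card(line)
--
-- def part_2(text):
--     """
--     >>> part_2(EXAMPLE_TEXT)
--     30
--     """
--     scratch_cards = list(parse(text))
--     card_counts = {name: 1 for (name, _, _) in scratch_cards}
--     card_contents = {
--         name: (winners, numbers) for (name, winners, numbers) in parse(text)
--     }
--     card_names = sorted(name for (name, _, _) in scratch_cards)
--     for i, name in enumerate(card_names):
--         winners, numbers = card_contents[name]
--         n_matches = sum(1 for x in numbers if x in winners)
--         for new_name in card_names[i + 1 : i + 1 + n_matches]:
--             card_counts[new_name] += card_counts[name]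
--     return sum(card_counts.values())
-- ===== SOURCE B (Python) =====
-- def part_2(text):
--     cards = []
--     for line in text.strip().split('\n'):
--         name, rest = line.split(':')
--         w_text, n_text = rest.split('|')
--         winners = set(int(x) for x in w_text.strip().split())
--         numbers = [int(x) for x in n_text.strip().split()]
--         cards.append((name, winners, numbers))
--     by_name = {name: (w, ns) for (name, w, ns) in cards}
--     order = sorted(name for (name, _, _) in cards)
--     matches = []
--     for name in order:
--         w, ns = by_name[name]
--         matches.append(sum(1 for x in ns if x in w))
--     counts = []
--     for j in range(len(order)):
--         c = 1
--         for i in range(j):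
--             if j - i <= matches[i]:
--                 c += counts[i]
--         counts.append(c)
--     return sum(counts)
-- ===== Notes on version B (the rewrite author's own statement) =====
-- stated objective: alternative
-- what changed: A pushes each card's count forward into a mutable dict over slices of the sorted name list; B precomputes the match counts and builds the counts as a list left-to-right, each entry pulled as 1 + sum of earlier counts whose match window reaches it, then sums the list.
-- outside the precondition, e.g. on part_2('A: 1 | 1 1\nA: 1 | 1'): A returns 2, B returns 3
import Mathlib
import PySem

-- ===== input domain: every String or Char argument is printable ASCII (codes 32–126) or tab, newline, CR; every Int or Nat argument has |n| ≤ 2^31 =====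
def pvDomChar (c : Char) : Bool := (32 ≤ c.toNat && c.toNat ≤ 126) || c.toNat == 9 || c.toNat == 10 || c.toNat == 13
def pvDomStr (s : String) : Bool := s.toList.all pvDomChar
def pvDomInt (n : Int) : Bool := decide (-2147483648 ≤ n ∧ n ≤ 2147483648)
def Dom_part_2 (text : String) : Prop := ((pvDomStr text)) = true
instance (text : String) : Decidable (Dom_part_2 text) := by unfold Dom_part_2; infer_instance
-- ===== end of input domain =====

-- B replaces A's forward push of counts into a mutable dict by a match-count list and a
-- left-to-right pull recurrence over plain lists (objective: alternative decomposition).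

-- ===== PORT A =====
-- shared parsing helper: both Pythons parse lines identically (split ':', split '|', int tokens);
-- `none` exactly where Python's unpacking/int() raises ValueError
def parseCard? (line : String) : Option (String × PySem.Set Int × List Int) :=
  match PySem.Str.split? line ":" with
  | some [name, rest] =>
    match PySem.Str.split? rest "|" with
    | some [wt, nt] =>
      match (PySem.Str.split₀ (PySem.Str.strip wt)).mapM PySem.Int.ofStr?,
            (PySem.Str.split₀ (PySem.Str.strip nt)).mapM PySem.Int.ofStr? with
      | some ws, some ns => some (name, PySem.Set.ofList ws, ns)
      | _, _ => none
    | _ => none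
  | _ => none

def parseCards? (text : String) : Option (List (String × PySem.Set Int × List Int)) :=
  ((PySem.Str.split? (PySem.Str.strip text) "\n").getD []).mapM parseCard?

def part_2 (text : String) : Int :=
  match parseCards? text with
  | none => 0   -- Python raises here; excluded by Pre_
  | some cards =>
    let counts0 : PySem.Dict String Int :=
      cards.foldl (fun d c => d.insert c.1 1) PySem.Dict.empty
    let contents : PySem.Dict String (PySem.Set Int × List Int) :=
      cards.foldl (fun d c => d.insert c.1 c.2) PySem.Dict.empty
    let names := PySem.List.sorted (cards.map (·.1)) (fun x => x)
    let final :=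
      (PySem.List.enumerate names).foldl (fun d p =>
        match contents.get? p.2 with
        | none => d   -- unreachable: every sorted name is a key of contents
        | some wn =>
          let nMatches : Int := (wn.2.map (fun x => if wn.1.contains x then (1:Int) else 0)).sum
          (PySem.List.slice names (some (p.1+1)) (some (p.1+1+nMatches))).foldl
            (fun d nn => d.insert nn (d.getD nn 0 + d.getD p.2 0)) d) counts0
    final.values.sum

-- ===== PORT B =====
def part_2_alt (text : String) : Int :=
  match parseCards? text with
  | none => 0   -- Python raises here; excluded by Pre_
  | some cards =>
    let byName : PySem.Dict String (PySem.Set Int × List Int) :=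
      cards.foldl (fun d c => d.insert c.1 c.2) PySem.Dict.empty
    let order := PySem.List.sorted (cards.map (·.1)) (fun x => x)
    let mlist : List Int :=
      order.foldl (fun acc name =>
        match byName.get? name with
        | none => acc   -- unreachable: every sorted name is a key of byName
        | some wn => acc ++ [(wn.2.map (fun x => if wn.1.contains x then (1:Int) else 0)).sum]) []
    let counts : List Int :=
      (PySem.List.pyRange 0 order.length 1).foldl (fun cs j =>
        cs ++ [(PySem.List.pyRange 0 j 1).foldl (fun c i =>
          if j - i ≤ PySem.List.pyGetD mlist i 0 then c + PySem.List.pyGetD cs i 0 else c) 1]) []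
    counts.sum

-- ===== PRECONDITION & SPEC =====
-- line shape Python's unpacking and int() accept: exactly one ':', exactly one '|' after it,
-- every token an int literal
def pvLineOk (line : String) : Bool :=
  match PySem.Str.split? line ":" with
  | some [_, rest] =>
    match PySem.Str.split? rest "|" with
    | some [wt, nt] =>
      (PySem.Str.split₀ (PySem.Str.strip wt)).all (fun t => (PySem.Int.ofStr? t).isSome) &&
      (PySem.Str.split₀ (PySem.Str.strip nt)).all (fun t => (PySem.Int.ofStr? t).isSome)
    | _ => false
  | _ => false

def pvLineName (line : String) : String :=
  ((PySem.Str.split? line ":").getD []).headD ""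

-- Pre_ admits the inputs where A returns normally (every line well formed) and, additionally,
-- excludes inputs with DUPLICATE card names, on which A's dict-collapsed counts are an accident
-- of keying by name; B does the natural per-card thing there.
def Pre_part_2 (text : String) : Prop :=
  (∀ l ∈ (PySem.Str.split? (PySem.Str.strip text) "\n").getD [], pvLineOk l = true) ∧
  (((PySem.Str.split? (PySem.Str.strip text) "\n").getD []).map pvLineName).Nodup

instance (text : String) : Decidable (Pre_part_2 text) := by unfold Pre_part_2; infer_instance

def pvWitness_part_2 : String := "Card 1: 1 2 | 2 3 4\nCard 2: 5 | 5"

def Spec_part_2 (text : String) (out : Int) : Prop := out = part_2_alt text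
instance (text : String) (out : Int) : Decidable (Spec_part_2 text out) := by unfold Spec_part_2; infer_instance

-- ===== CLAIM (what is proved, stated in full; the proofs are below) =====
def Claim_equal_part_2 : Prop := ∀ (text : String), Dom_part_2 text → Pre_part_2 text → Spec_part_2 text (part_2 text)

-- ===== LEMMAS AND PROOFS =====

-- proof-side views of the shared data
def pvCdict (cards : List (String × PySem.Set Int × List Int)) :
    PySem.Dict String (PySem.Set Int × List Int) :=
  cards.foldl (fun d c => d.insert c.1 c.2) PySem.Dict.empty

def pvMval (cards : List (String × PySem.Set Int × List Int)) (nm : String) : Int :=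
  match (pvCdict cards).get? nm with
  | none => 0
  | some wn => (wn.2.map (fun x => if wn.1.contains x then (1:Int) else 0)).sum

def pvNames (cards : List (String × PySem.Set Int × List Int)) : List String :=
  PySem.List.sorted (cards.map (·.1)) (fun x => x)

def pvM (cards : List (String × PySem.Set Int × List Int)) (i : Nat) : Int :=
  pvMval cards ((pvNames cards).getD i "")

-- the common reference value: count of cards j (in sorted order) finally held
def pvC (cards : List (String × PySem.Set Int × List Int)) : Nat → Int
  | j => 1 + ((List.range j).attach.map
      (fun i => if (j:Int) - i.1 ≤ pvM cards i.1 then pvC cards i.1 else 0)).sum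
  termination_by j => j
  decreasing_by exact List.mem_range.mp i.2

-- partial value of card j after A has processed the first t sorted cards
def pvP (cards : List (String × PySem.Set Int × List Int)) (t j : Nat) : Int :=
  1 + ((List.range (min t j)).map
      (fun i => if (j:Int) - i ≤ pvM cards i then pvC cards i else 0)).sum

theorem pvC_eq (cards : List (String × PySem.Set Int × List Int)) (j : Nat) :
    pvC cards j = 1 + ((List.range j).map
      (fun i => if (j:Int) - i ≤ pvM cards i then pvC cards i else 0)).sum := by
  rw [pvC]
  congr 1
  rw [List.attach_map_val (l := List.range j)
    (f := fun i => if (j:Int) - i ≤ pvM cards i then pvC cards i else 0)]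

theorem pvP_final (cards : List (String × PySem.Set Int × List Int)) {t j : Nat} (h : j ≤ t) :
    pvP cards t j = pvC cards j := by
  rw [pvC_eq, pvP, Nat.min_eq_right h]

theorem pvP_zero (cards : List (String × PySem.Set Int × List Int)) (j : Nat) :
    pvP cards 0 j = 1 := by
  simp [pvP]

theorem pvP_succ (cards : List (String × PySem.Set Int × List Int)) (t j : Nat) :
    pvP cards (t+1) j = pvP cards t j +
      (if t + 1 ≤ j ∧ (j:Int) - t ≤ pvM cards t then pvC cards t else 0) := by
  by_cases h : t + 1 ≤ j
  · rw [pvP, pvP, Nat.min_eq_left (by omega), Nat.min_eq_left (by omega),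
      List.range_succ, List.map_append, List.sum_append]
    simp [h]
    ring
  · rw [pvP, pvP, Nat.min_eq_right (by omega), Nat.min_eq_right (by omega)]
    simp [h]

theorem pvMval_nonneg (cards : List (String × PySem.Set Int × List Int)) (nm : String) :
    0 ≤ pvMval cards nm := by
  unfold pvMval
  split
  · norm_num
  · apply List.sum_nonneg
    intro x hx
    simp only [List.mem_map] at hx
    obtain ⟨y, _, rfl⟩ := hx
    split <;> norm_num

theorem getD_map_of_lt {α β : Type} (l : List α) (f : α → β) (k : Nat) (d : β) (d' : α)
    (h : k < l.length) : (l.map f).getD k d = f (l.getD k d') := by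
  rw [List.getD_eq_getElem _ _ (by simpa using h), List.getD_eq_getElem _ _ h]
  simp

theorem map_eq_range_getD {α β : Type} (l : List α) (f : α → β) (d : α) :
    l.map f = (List.range l.length).map (fun i => f (l.getD i d)) := by
  apply List.ext_getElem
  · simp
  · intro i h1 h2
    simp only [List.getElem_map, List.getElem_range]
    rw [List.getD_eq_getElem _ _ (by simpa using h2)]

theorem mapM_isSome {α β : Type} (f : α → Option β) (l : List α)
    (h : ∀ x ∈ l, (f x).isSome) : ∃ ys, l.mapM f = some ys := by
  induction l with
  | nil => exact ⟨[], rfl⟩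
  | cons x xs ih =>
    obtain ⟨y, hy⟩ := Option.isSome_iff_exists.mp (h x (by simp))
    obtain ⟨ys, hys⟩ := ih (fun a ha => h a (by simp [ha]))
    exact ⟨y :: ys, by simp [List.mapM_cons, hy, hys]⟩

theorem get?_pvCdict_isSome (cards : List (String × PySem.Set Int × List Int)) (nm : String)
    (h : nm ∈ cards.map (·.1)) : ((pvCdict cards).get? nm).isSome := by
  suffices H : ∀ (l : List (String × PySem.Set Int × List Int))
      (d : PySem.Dict String (PySem.Set Int × List Int)) (nm : String),
      (nm ∈ l.map (·.1) ∨ (d.get? nm).isSome) →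
      ((l.foldl (fun d c => d.insert c.1 c.2) d).get? nm).isSome by
    exact H cards PySem.Dict.empty nm (Or.inl h)
  intro l
  induction l with
  | nil => intro d nm h; simpa using h.resolve_left (by simp)
  | cons c cs ih =>
    intro d nm h
    simp only [List.foldl_cons]
    apply ih
    by_cases hc : nm = c.1
    · subst hc
      exact Or.inr (by simp [PySem.Dict.get?_insert_self])
    · rcases h with h | h
      · simp only [List.map_cons, List.mem_cons] at h
        exact Or.inl (h.resolve_left hc)
      · exact Or.inr (by rwa [PySem.Dict.get?_insert_of_ne _ _ hc])

theorem getD_foldl_insert_not_mem (l : List (String × PySem.Set Int × List Int))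
    (d : PySem.Dict String Int) (nm : String) (h : nm ∉ l.map (·.1)) :
    (l.foldl (fun d c => d.insert c.1 (1:Int)) d).getD nm 0 = d.getD nm 0 := by
  induction l generalizing d with
  | nil => rfl
  | cons c cs ih =>
    simp only [List.map_cons, List.mem_cons, not_or] at h
    simp only [List.foldl_cons]
    rw [ih _ (by simpa using h.2), PySem.Dict.getD_insert, if_neg h.1]

theorem getD_foldl_insert_one (l : List (String × PySem.Set Int × List Int))
    (d : PySem.Dict String Int) (nm : String) (h : nm ∈ l.map (·.1)) :
    (l.foldl (fun d c => d.insert c.1 (1:Int)) d).getD nm 0 = 1 := by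
  induction l generalizing d with
  | nil => simp at h
  | cons c cs ih =>
    simp only [List.foldl_cons]
    by_cases hm : nm ∈ cs.map (·.1)
    · exact ih _ hm
    · simp only [List.map_cons, List.mem_cons] at h
      have hc : nm = c.1 := h.resolve_right hm
      subst hc
      rw [getD_foldl_insert_not_mem _ _ _ hm, PySem.Dict.getD_insert]
      simp

theorem update_eq_self_of_subset (s : PySem.Set String) (l : List String)
    (h : ∀ x ∈ l, x ∈ s) : PySem.Set.update s l = s := by
  rw [PySem.Set.update_eq_append_filter]
  have : (PySem.Set.ofList l).filter (fun y => !(PySem.Set.contains s y)) = [] := by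
    rw [List.filter_eq_nil_iff]
    intro y hy
    have hys : y ∈ s := h y ((PySem.Set.mem_ofList l y).mp hy)
    simpa using hys
  rw [this, List.append_nil]

theorem foldl_push_getD (l : List String) (k0 : String) (d : PySem.Dict String Int)
    (hnd : l.Nodup) (hk0 : k0 ∉ l) (k : String) :
    (l.foldl (fun d nn => d.insert nn (d.getD nn 0 + d.getD k0 0)) d).getD k 0
      = d.getD k 0 + (if k ∈ l then d.getD k0 0 else 0) := by
  induction l generalizing d with
  | nil => simp
  | cons nn rest ih =>
    simp only [List.mem_cons, not_or] at hk0
    have hnn : nn ∉ rest := (List.nodup_cons.mp hnd).1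
    simp only [List.foldl_cons]
    rw [ih _ (List.nodup_cons.mp hnd).2 hk0.2]
    rw [PySem.Dict.getD_insert, PySem.Dict.getD_insert, if_neg hk0.1]
    by_cases hk : k = nn
    · subst hk
      simp [hnn]
    · simp [hk, List.mem_cons]

theorem mem_window {s : List String} (hnd : s.Nodup) {j : Nat} (a k : Nat)
    (hj : j < s.length) :
    s.getD j "" ∈ List.take k (List.drop a s) ↔ (a ≤ j ∧ j < a + k) := by
  rw [List.getD_eq_getElem _ _ hj]
  constructor
  · intro hm
    obtain ⟨i, hi, hie⟩ := List.getElem_of_mem hm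
    have hlen : i < min k (s.length - a) := by simpa [List.length_take, List.length_drop] using hi
    have : (List.take k (List.drop a s))[i] = s[a + i]'(by omega) := by
      rw [List.getElem_take, List.getElem_drop]
    rw [this] at hie
    have := (List.Nodup.getElem_inj_iff hnd).mp hie
    omega
  · intro ⟨h1, h2⟩
    have hlen : j - a < (List.take k (List.drop a s)).length := by
      simp [List.length_take, List.length_drop]
      omega
    have : (List.take k (List.drop a s))[j - a] = s[a + (j - a)]'(by omega) := by
      rw [List.getElem_take, List.getElem_drop]
    rw [List.mem_iff_getElem]
    refine ⟨j - a, hlen, ?_⟩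
    rw [this]
    congr 1
    omega

-- B's match-count loop is the map of pvMval over the sorted names
theorem mlist_eq (cards : List (String × PySem.Set Int × List Int)) (order : List String)
    (h : ∀ nm ∈ order, nm ∈ cards.map (·.1)) (acc : List Int) :
    order.foldl (fun acc name =>
      match (pvCdict cards).get? name with
      | none => acc
      | some wn => acc ++ [(wn.2.map (fun x => if wn.1.contains x then (1:Int) else 0)).sum]) acc
    = acc ++ order.map (pvMval cards) := by
  rw [PySem.List.foldl_congr_mem order _ (fun acc name => acc ++ [pvMval cards name]) acc ?_]
  · exact PySem.List.foldl_append_singleton_eq_map _ _ _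
  · intro acc0 nm hmem
    obtain ⟨wn, hwn⟩ := Option.isSome_iff_exists.mp (get?_pvCdict_isSome cards nm (h nm hmem))
    have hv : pvMval cards nm
        = (wn.2.map (fun x => if wn.1.contains x then (1:Int) else 0)).sum := by
      unfold pvMval
      rw [hwn]
    rw [hwn]
    dsimp only
    rw [hv]

-- B's inner pull fold computes pvC t
theorem Binner (cards : List (String × PySem.Set Int × List Int)) (t : Nat)
    (ht : t ≤ (pvNames cards).length) :
    (PySem.List.pyRange 0 (t:Int)).foldl (fun c i =>
      if (t:Int) - i ≤ PySem.List.pyGetD ((pvNames cards).map (pvMval cards)) i 0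
      then c + PySem.List.pyGetD ((List.range t).map (pvC cards)) i 0 else c) 1
    = pvC cards t := by
  rw [PySem.List.pyRange_zero_natCast, List.foldl_map]
  rw [PySem.List.foldl_congr_mem _ _
    (fun c k => c + (if (t:Int) - k ≤ pvM cards k then pvC cards k else 0)) 1 ?_]
  · rw [PySem.List.foldl_add, ← pvC_eq]
  · intro c k hk
    dsimp only
    have hkt : k < t := List.mem_range.mp hk
    rw [PySem.List.pyGetD_natCast, PySem.List.pyGetD_natCast]
    rw [getD_map_of_lt _ _ _ _ "" (by omega)]
    rw [getD_map_of_lt _ _ _ _ 0 (by simpa using hkt)]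
    have hrk : (List.range t).getD k 0 = k := by
      rw [List.getD_eq_getElem _ _ (by simpa using hkt), List.getElem_range]
    rw [hrk]
    simp only [pvM]
    split_ifs
    · rfl
    · simp

-- B's outer loop builds the list of pvC values
theorem Bcounts (cards : List (String × PySem.Set Int × List Int)) (t : Nat)
    (ht : t ≤ (pvNames cards).length) :
    (PySem.List.pyRange 0 (t:Int)).foldl (fun cs j =>
      cs ++ [(PySem.List.pyRange 0 j).foldl (fun c i =>
        if j - i ≤ PySem.List.pyGetD ((pvNames cards).map (pvMval cards)) i 0
        then c + PySem.List.pyGetD cs i 0 else c) 1]) []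
    = (List.range t).map (pvC cards) := by
  induction t with
  | zero =>
    rw [show ((0:Nat):Int) = ((0:Nat):Int) from rfl, PySem.List.pyRange_zero_natCast]
    simp
  | succ t ih =>
    have h0t : (0:Int) ≤ (t:Int) := by positivity
    rw [show ((t+1:Nat):Int) = (t:Int)+1 by push_cast; ring]
    rw [PySem.List.pyRange_one_succ_right h0t, List.foldl_append, ih (by omega)]
    simp only [List.foldl_cons, List.foldl_nil]
    rw [Binner cards t (by omega)]
    rw [List.range_succ, List.map_append]
    rfl

theorem part2alt_eq_sum (text : String) (cards : List (String × PySem.Set Int × List Int))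
    (hp : parseCards? text = some cards) :
    part_2_alt text = ((List.range (pvNames cards).length).map (pvC cards)).sum := by
  unfold part_2_alt
  rw [hp]
  dsimp only
  rw [show (cards.foldl (fun d c => d.insert c.1 c.2)
      (PySem.Dict.empty : PySem.Dict String (PySem.Set Int × List Int))) = pvCdict cards from rfl]
  rw [show PySem.List.sorted (cards.map (·.1)) (fun x => x) = pvNames cards from rfl]
  rw [mlist_eq cards (pvNames cards)
    (fun nm h => (PySem.List.mem_sorted _ _ _ _).mp h) []]
  rw [List.nil_append]
  rw [Bcounts cards (pvNames cards).length le_rfl]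

-- one step of A's outer loop: shared facts
theorem pvNames_nodup (cards : List (String × PySem.Set Int × List Int))
    (hnd : (cards.map (·.1)).Nodup) : (pvNames cards).Nodup := by
  unfold pvNames
  exact (List.Perm.nodup_iff (PySem.List.sorted_perm _ _ _)).mpr hnd

theorem pvNames_getD_mem (cards : List (String × PySem.Set Int × List Int)) (j : Nat)
    (hj : j < (pvNames cards).length) : (pvNames cards).getD j "" ∈ cards.map (·.1) := by
  rw [List.getD_eq_getElem _ _ hj]
  exact (PySem.List.mem_sorted _ _ _ _).mp (List.getElem_mem _)

theorem Astep_keys (cards : List (String × PySem.Set Int × List Int))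
    (t : Nat) (d : PySem.Dict String Int) (hk : d.keys = cards.map (·.1)) :
    (match (pvCdict cards).get? (PySem.List.pyGetD (pvNames cards) (t:Int) "") with
      | none => d
      | some wn =>
        (PySem.List.slice (pvNames cards) (some ((t:Int)+1)) (some ((t:Int)+1+
            (wn.2.map (fun x => if wn.1.contains x then (1:Int) else 0)).sum))).foldl
          (fun d nn => d.insert nn (d.getD nn (0:Int) + d.getD (PySem.List.pyGetD (pvNames cards) (t:Int) "") (0:Int))) d).keys
      = cards.map (·.1) := by
  have hjt : PySem.List.pyGetD (pvNames cards) (t:Int) "" = (pvNames cards).getD t "" :=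
    PySem.List.pyGetD_natCast _ _ _
  split
  · exact hk
  · case _ wn heq =>
    rw [hjt] at heq ⊢
    have hsum : (wn.2.map (fun x => if wn.1.contains x then (1:Int) else 0)).sum = pvM cards t := by
      unfold pvM pvMval
      rw [heq]
    rw [hsum]
    have hm0 : 0 ≤ pvM cards t := pvMval_nonneg cards _
    have hc1 : (t:Int) + 1 + pvM cards t = ((t + 1 + (pvM cards t).toNat : Nat) : Int) := by
      push_cast [Int.toNat_of_nonneg hm0]
      ring
    have hc0 : (t:Int) + 1 = ((t + 1 : Nat) : Int) := by push_cast; ring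
    rw [hc1, hc0, PySem.List.slice_natCast]
    have hwnd_sub : (List.take (t + 1 + (pvM cards t).toNat - (t+1)) (List.drop (t+1) (pvNames cards))).Sublist (pvNames cards) :=
      (List.take_sublist _ _).trans (List.drop_sublist _ _)
    have hkeys := PySem.Dict.keys_foldl_insert
      (List.take (t + 1 + (pvM cards t).toNat - (t+1)) (List.drop (t+1) (pvNames cards)))
      (fun d nn => d.getD nn (0:Int) + d.getD ((pvNames cards).getD t "") (0:Int)) d
    rw [hkeys, hk]
    apply update_eq_self_of_subset
    intro x hx
    exact (PySem.List.mem_sorted _ _ _ _).mp (hwnd_sub.mem hx)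

theorem Astep_vals (cards : List (String × PySem.Set Int × List Int))
    (hnd : (cards.map (·.1)).Nodup) (t : Nat) (ht : t < (pvNames cards).length)
    (d : PySem.Dict String Int)
    (hv : ∀ j < (pvNames cards).length, d.getD ((pvNames cards).getD j "") (0:Int) = pvP cards t j)
    (j : Nat) (hj : j < (pvNames cards).length) :
    (match (pvCdict cards).get? (PySem.List.pyGetD (pvNames cards) (t:Int) "") with
      | none => d
      | some wn =>
        (PySem.List.slice (pvNames cards) (some ((t:Int)+1)) (some ((t:Int)+1+
            (wn.2.map (fun x => if wn.1.contains x then (1:Int) else 0)).sum))).foldl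
          (fun d nn => d.insert nn (d.getD nn (0:Int) + d.getD (PySem.List.pyGetD (pvNames cards) (t:Int) "") (0:Int))) d).getD ((pvNames cards).getD j "") (0:Int)
      = pvP cards (t+1) j := by
  have hndS : (pvNames cards).Nodup := pvNames_nodup cards hnd
  have hjt : PySem.List.pyGetD (pvNames cards) (t:Int) "" = (pvNames cards).getD t "" :=
    PySem.List.pyGetD_natCast _ _ _
  split
  · case _ heq =>
    have hs := get?_pvCdict_isSome _ _ (pvNames_getD_mem cards t ht)
    rw [hjt] at heq
    rw [heq] at hs
    simp at hs
  · case _ wn heq =>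
    rw [hjt] at heq
    have hsum : (wn.2.map (fun x => if wn.1.contains x then (1:Int) else 0)).sum = pvM cards t := by
      unfold pvM pvMval
      rw [heq]
    rw [hjt, hsum]
    have hm0 : 0 ≤ pvM cards t := pvMval_nonneg cards _
    have hc1 : (t:Int) + 1 + pvM cards t = ((t + 1 + (pvM cards t).toNat : Nat) : Int) := by
      push_cast [Int.toNat_of_nonneg hm0]
      ring
    have hc0 : (t:Int) + 1 = ((t + 1 : Nat) : Int) := by push_cast; ring
    rw [hc1, hc0, PySem.List.slice_natCast]
    have hsub : t + 1 + (pvM cards t).toNat - (t + 1) = (pvM cards t).toNat := by omega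
    rw [hsub]
    have hwnd_sub : (List.take (pvM cards t).toNat (List.drop (t+1) (pvNames cards))).Sublist (pvNames cards) :=
      (List.take_sublist _ _).trans (List.drop_sublist _ _)
    have hwnd_nd : (List.take (pvM cards t).toNat (List.drop (t+1) (pvNames cards))).Nodup :=
      hwnd_sub.nodup hndS
    have hk0 : (pvNames cards).getD t "" ∉
        List.take (pvM cards t).toNat (List.drop (t+1) (pvNames cards)) := by
      intro hmem'
      have := (mem_window hndS (t+1) (pvM cards t).toNat ht).mp hmem'
      omega
    rw [foldl_push_getD _ _ _ hwnd_nd hk0 _]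
    rw [hv j hj, hv t (by omega), pvP_final cards (le_refl t), pvP_succ]
    congr 1
    have hcast : ((pvM cards t).toNat : Int) = pvM cards t := Int.toNat_of_nonneg hm0
    have hiff : ((pvNames cards).getD j "" ∈
        List.take (pvM cards t).toNat (List.drop (t+1) (pvNames cards)))
        ↔ (t + 1 ≤ j ∧ (j:Int) - (t:Int) ≤ pvM cards t) := by
      rw [mem_window hndS (t+1) (pvM cards t).toNat hj]
      constructor
      · exact fun h => ⟨h.1, by omega⟩
      · exact fun h => ⟨h.1, by omega⟩
    rw [if_congr hiff rfl rfl]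

-- A's loop invariant
theorem Aloop (cards : List (String × PySem.Set Int × List Int))
    (hnd : (cards.map (·.1)).Nodup) (t : Nat) (ht : t ≤ (pvNames cards).length) :
    (((PySem.List.pyRange 0 (t:Int)).foldl (fun d j =>
      match (pvCdict cards).get? (PySem.List.pyGetD (pvNames cards) j "") with
      | none => d
      | some wn =>
        (PySem.List.slice (pvNames cards) (some (j+1)) (some (j+1+
            (wn.2.map (fun x => if wn.1.contains x then (1:Int) else 0)).sum))).foldl
          (fun d nn => d.insert nn (d.getD nn (0:Int) + d.getD (PySem.List.pyGetD (pvNames cards) j "") (0:Int))) d)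
      (cards.foldl (fun d c => d.insert c.1 (1:Int)) PySem.Dict.empty)).keys = cards.map (·.1))
    ∧ ∀ j < (pvNames cards).length,
      ((PySem.List.pyRange 0 (t:Int)).foldl (fun d j =>
      match (pvCdict cards).get? (PySem.List.pyGetD (pvNames cards) j "") with
      | none => d
      | some wn =>
        (PySem.List.slice (pvNames cards) (some (j+1)) (some (j+1+
            (wn.2.map (fun x => if wn.1.contains x then (1:Int) else 0)).sum))).foldl
          (fun d nn => d.insert nn (d.getD nn (0:Int) + d.getD (PySem.List.pyGetD (pvNames cards) j "") (0:Int))) d)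
      (cards.foldl (fun d c => d.insert c.1 (1:Int)) PySem.Dict.empty)).getD ((pvNames cards).getD j "") (0:Int)
      = pvP cards t j := by
  induction t with
  | zero =>
    rw [PySem.List.pyRange_zero_natCast]
    simp only [List.range_zero, List.map_nil, List.foldl_nil]
    have hkeys := PySem.Dict.keys_foldl_insert_key cards (fun c => c.1)
      (fun _ _ => (1:Int)) PySem.Dict.empty
    constructor
    · rw [hkeys]
      rw [show (PySem.Dict.empty : PySem.Dict String Int).keys = [] from rfl]
      rw [PySem.Set.update_nil_left]
      exact PySem.Set.ofList_eq_self_of_nodup _ hnd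
    · intro j hj
      rw [getD_foldl_insert_one cards _ _ ?_, pvP_zero]
      rw [List.getD_eq_getElem _ _ hj]
      exact (PySem.List.mem_sorted _ _ _ _).mp (List.getElem_mem _)
  | succ t ih =>
    obtain ⟨ihk, ihv⟩ := ih (by omega)
    rw [show ((t+1:Nat):Int) = (t:Int)+1 by push_cast; ring]
    rw [PySem.List.pyRange_one_succ_right (by positivity), List.foldl_append]
    simp only [List.foldl_cons, List.foldl_nil]
    exact ⟨Astep_keys cards t _ ihk,
      fun j hj => Astep_vals cards hnd t (by omega) _ ihv j hj⟩

theorem sum_over_perm (cards : List (String × PySem.Set Int × List Int)) (g : String → Int)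
    (hg : ∀ j < (pvNames cards).length, g ((pvNames cards).getD j "") = pvC cards j) :
    ((cards.map (·.1)).map g).sum = ((List.range (pvNames cards).length).map (pvC cards)).sum := by
  have hperm := (((show (pvNames cards).Perm (cards.map (·.1)) from
    PySem.List.sorted_perm _ _ _)).map g).sum_eq
  rw [← hperm]
  rw [map_eq_range_getD (pvNames cards) g ""]
  apply congrArg List.sum
  apply List.map_congr_left
  intro j hj
  exact hg j (List.mem_range.mp hj)

theorem part2_eq_sum (text : String) (cards : List (String × PySem.Set Int × List Int))
    (hp : parseCards? text = some cards) (hnd : (cards.map (·.1)).Nodup) :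
    part_2 text = ((List.range (pvNames cards).length).map (pvC cards)).sum := by
  unfold part_2
  rw [hp]
  dsimp only
  rw [show (cards.foldl (fun d c => d.insert c.1 c.2)
      (PySem.Dict.empty : PySem.Dict String (PySem.Set Int × List Int))) = pvCdict cards from rfl]
  rw [show PySem.List.sorted (cards.map (·.1)) (fun x => x) = pvNames cards from rfl]
  rw [PySem.List.enumerate_eq_map_pyRange (pvNames cards) ""]
  rw [List.foldl_map]
  rw [show PySem.List.len (pvNames cards) = ((pvNames cards).length : Int) from rfl]
  obtain ⟨hkeys, hvals⟩ := Aloop cards hnd (pvNames cards).length le_rfl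
  rw [PySem.Dict.values_eq_map_keys _ (by rw [hkeys]; exact hnd) (0:Int)]
  rw [hkeys]
  exact sum_over_perm cards _ (fun j hj => by rw [hvals j hj, pvP_final cards (Nat.le_of_lt hj)])

theorem parseCard?_of_ok (l : String) (h : pvLineOk l = true) :
    ∃ c, parseCard? l = some c ∧ c.1 = pvLineName l := by
  unfold pvLineOk at h
  split at h
  case h_2 => simp at h
  case h_1 nm rest heq1 =>
    split at h
    case h_2 => simp at h
    case h_1 wt nt heq2 =>
      simp only [Bool.and_eq_true, List.all_eq_true] at h
      obtain ⟨ws, hws⟩ := mapM_isSome _ _ (fun x hx => h.1 x hx)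
      obtain ⟨ns, hns⟩ := mapM_isSome _ _ (fun x hx => h.2 x hx)
      refine ⟨(nm, PySem.Set.ofList ws, ns), ?_, ?_⟩
      · unfold parseCard?
        rw [heq1]
        simp only []
        rw [heq2]
        simp only []
        rw [hws, hns]
      · unfold pvLineName
        rw [heq1]
        rfl

theorem mapM_parseCard?_of_ok (L : List String) (h : ∀ l ∈ L, pvLineOk l = true) :
    ∃ cs, L.mapM parseCard? = some cs ∧ cs.map (·.1) = L.map pvLineName := by
  induction L with
  | nil => exact ⟨[], rfl, rfl⟩
  | cons x xs ih =>
    obtain ⟨c, hc, hc1⟩ := parseCard?_of_ok x (h x (by simp))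
    obtain ⟨cs, hcs, hcs1⟩ := ih (fun a ha => h a (by simp [ha]))
    refine ⟨c :: cs, ?_, ?_⟩
    · simp [List.mapM_cons, hc, hcs]
    · simp [hc1, hcs1]

-- ===== VERDICT (by name: the statement is the Claim_ definition above) =====
theorem part_2_spec : Claim_equal_part_2 := by
  intro text _ hPre
  obtain ⟨h1, h2⟩ := hPre
  obtain ⟨cards, hp, hnames⟩ := mapM_parseCard?_of_ok _ h1
  have hp' : parseCards? text = some cards := hp
  have hnd : (cards.map (·.1)).Nodup := by rw [hnames]; exact h2
  unfold Spec_part_2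
  rw [part2_eq_sum text cards hp' hnd, part2alt_eq_sum text cards hp']
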